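-- pv_equiv track=rewrite | github.com/radityaharya/roomies | util.py | get_icon_from_facilities
-- ===== SOURCE A (Python) =====
-- def get_icon_from_facilities(facilities):
--     """
--     > It takes a list of facilities and returns a list of icons
--
--     Args:
--       facilities: a list of facilities
--
--     Returns:
--       A list of icons
--     """
--     icons = []
--     for facility in facilities:
--         if "Wifi" in facility:
--             icons.append("fa-solid fa-wifi")
--         elif "Parking" in facility:
--             icons.append("fa-solid fa-square-parking")
--         elif "Pool" in facility:
--             icons.append("fa-solid fa-person-swimming")
--         elif "Gym" in facility:
--             icons.append("fa-solid fa-dumbbell")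
--         else:
--             pass
--     return icons[:3]
-- ===== SOURCE B (Python) =====
-- _ICON_TABLE = [
--     ("Wifi", "fa-solid fa-wifi"),
--     ("Parking", "fa-solid fa-square-parking"),
--     ("Pool", "fa-solid fa-person-swimming"),
--     ("Gym", "fa-solid fa-dumbbell"),
-- ]
--
--
-- def get_icon_from_facilities(facilities):
--     # keyword-major traversal: one pass per table entry, in priority order,
--     # marking each facility's slot the first time any keyword hits it;
--     # then compact the positional array (facility order is preserved) and take 3
--     slots = [None] * len(facilities)
--     for sub, icon in _ICON_TABLE:
--         for i, facility in enumerate(facilities):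
--             if slots[i] is None and sub in facility:
--                 slots[i] = icon
--     return [icon for icon in slots if icon is not None][:3]
-- ===== Notes on version B (the rewrite author's own statement) =====
-- stated objective: alternative
-- what changed: Inverts the traversal order: instead of A's facility-major loop with an if/elif cascade, B makes one pass per (substring, icon) table entry in priority order, marking a positional slot array whose earlier marks win, then compacts the array and takes the first three.
import Mathlib
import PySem

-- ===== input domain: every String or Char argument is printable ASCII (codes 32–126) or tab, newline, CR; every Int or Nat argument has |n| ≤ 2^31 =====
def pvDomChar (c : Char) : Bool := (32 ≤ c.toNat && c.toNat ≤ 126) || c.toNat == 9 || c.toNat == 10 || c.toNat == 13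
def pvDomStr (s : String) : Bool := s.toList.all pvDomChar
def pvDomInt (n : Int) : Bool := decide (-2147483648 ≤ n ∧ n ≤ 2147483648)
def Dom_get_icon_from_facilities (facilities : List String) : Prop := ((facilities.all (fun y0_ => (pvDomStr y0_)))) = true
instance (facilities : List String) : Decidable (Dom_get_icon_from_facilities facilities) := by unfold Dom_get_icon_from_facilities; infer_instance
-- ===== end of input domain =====

-- B inverts the traversal order: one pass per (substring, icon) table entry in priority
-- order marking a positional slot array (earlier marks win), then compacts and takes the
-- first three — an alternative to A's facility-major if/elif cascade with a final slice.


-- ===== PORT A =====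
-- the body of A's for-loop (the if/elif cascade), as the step of a foldl
def pvAStep (icons : List String) (facility : String) : List String :=
  if PySem.Str.isIn "Wifi" facility then icons ++ ["fa-solid fa-wifi"]
  else if PySem.Str.isIn "Parking" facility then icons ++ ["fa-solid fa-square-parking"]
  else if PySem.Str.isIn "Pool" facility then icons ++ ["fa-solid fa-person-swimming"]
  else if PySem.Str.isIn "Gym" facility then icons ++ ["fa-solid fa-dumbbell"]
  else icons

def get_icon_from_facilities (facilities : List String) : List String :=
  PySem.List.slice (facilities.foldl pvAStep []) none (some 3)

-- ===== PORT B =====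
def pvIconTable : List (String × String) :=
  [("Wifi", "fa-solid fa-wifi"),
   ("Parking", "fa-solid fa-square-parking"),
   ("Pool", "fa-solid fa-person-swimming"),
   ("Gym", "fa-solid fa-dumbbell")]

-- B's inner loop (index-aligned writes into the slot array) ported as a zipWith:
-- exact, since slots and facilities always have equal length
def pvMarkPass (fs : List String) (slots : List (Option String)) (sub icon : String) :
    List (Option String) :=
  List.zipWith
    (fun cur f =>
      match cur with
      | some x => some x
      | none => if PySem.Str.isIn sub f then some icon else none)
    slots fs

def get_icon_from_facilities_alt (facilities : List String) : List String :=
  let slots :=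
    pvIconTable.foldl (fun slots p => pvMarkPass facilities slots p.1 p.2)
      (facilities.map fun _ => (none : Option String))
  ((slots.filterMap id).take 3)

-- ===== PRECONDITION & SPEC =====
def Spec_get_icon_from_facilities (facilities : List String) (out : List String) : Prop := out = get_icon_from_facilities_alt facilities
instance (facilities : List String) (out : List String) : Decidable (Spec_get_icon_from_facilities facilities out) := by unfold Spec_get_icon_from_facilities; infer_instance

-- ===== CLAIM (what is proved, stated in full; the proofs are below) =====
def Claim_equal_get_icon_from_facilities : Prop := ∀ (facilities : List String), Dom_get_icon_from_facilities facilities → Spec_get_icon_from_facilities facilities (get_icon_from_facilities facilities)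

-- ===== LEMMAS AND PROOFS =====

-- the first (substring, icon) table entry matching a facility, per priority order
def pvFirstIcon (facility : String) : Option String :=
  (pvIconTable.find? (fun p => PySem.Str.isIn p.1 facility)).map Prod.snd

-- A's cascade step, expressed through the first-match table lookup
theorem pvAStep_eq_table (acc : List String) (f : String) :
    pvAStep acc f =
      (match pvFirstIcon f with
       | some icon => acc ++ [icon]
       | none => acc) := by
  simp only [pvAStep, pvFirstIcon, pvIconTable, List.find?]
  cases PySem.Str.isIn "Wifi" f <;> cases PySem.Str.isIn "Parking" f <;>
    cases PySem.Str.isIn "Pool" f <;> cases PySem.Str.isIn "Gym" f <;> simp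

-- A's fold is filterMap pvFirstIcon
theorem pvFoldl_eq_filterMap (fs : List String) (acc : List String) :
    fs.foldl pvAStep acc = acc ++ fs.filterMap pvFirstIcon := by
  induction fs generalizing acc with
  | nil => simp
  | cons f fs ih =>
    simp only [List.foldl, List.filterMap_cons]
    rw [pvAStep_eq_table]
    cases h : pvFirstIcon f with
    | none => simpa using ih acc
    | some icon => simp [ih, List.append_assoc]

-- B's four keyword-major passes compute, slot by slot, the first-match lookup
theorem pvPasses_eq_map (fs : List String) :
    pvIconTable.foldl (fun slots p => pvMarkPass fs slots p.1 p.2)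
      (fs.map fun _ => (none : Option String)) = fs.map pvFirstIcon := by
  induction fs with
  | nil => simp [pvIconTable, pvMarkPass]
  | cons f fs ih =>
    simp only [pvIconTable, List.foldl, pvMarkPass, List.map_cons, List.zipWith_cons_cons] at ih ⊢
    rw [ih]
    simp only [pvFirstIcon, pvIconTable, List.find?]
    cases PySem.Str.isIn "Wifi" f <;> cases PySem.Str.isIn "Parking" f <;>
      cases PySem.Str.isIn "Pool" f <;> cases PySem.Str.isIn "Gym" f <;> simp

-- ===== VERDICT (by name: the statement is the Claim_ definition above) =====
theorem get_icon_from_facilities_spec : Claim_equal_get_icon_from_facilities := by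
  intro facilities _
  unfold Spec_get_icon_from_facilities get_icon_from_facilities get_icon_from_facilities_alt
  rw [pvFoldl_eq_filterMap, pvPasses_eq_map]
  simp [PySem.List.slice, List.filterMap_map, Function.comp_def]
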